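-- pv_equiv track=rewrite | github.com/dritoshi/ai-biocode-kata | scripts/build_review_artifacts.py | find_inline_code_spans
-- ===== SOURCE A (Python) =====
-- def find_inline_code_spans(line: str) -> list[tuple[int, int]]:
--     spans: list[tuple[int, int]] = []
--     stack: tuple[str, int] | None = None
--     index = 0
--
--     while index < len(line):
--         if line[index] != "`":
--             index += 1
--             continue
--
--         end = index
--         while end < len(line) and line[end] == "`":
--             end += 1
--
--         fence = line[index:end]
--         if stack is None:
--             stack = (fence, index)
--         elif stack[0] == fence:
--             spans.append((stack[1], end))
--             stack = None
--         index = end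
--
--     return spans
-- ===== SOURCE B (Python) =====
-- def find_inline_code_spans(line: str) -> list[tuple[int, int]]:
--     # pass 1: collect all maximal backtick runs as (start, end) pairs
--     runs: list[tuple[int, int]] = []
--     start = None
--     for i, ch in enumerate(line):
--         if ch == "`":
--             if start is None:
--                 start = i
--         elif start is not None:
--             runs.append((start, i))
--             start = None
--     if start is not None:
--         runs.append((start, len(line)))
--     # pass 2: pair runs of equal length with a one-slot open fence
--     spans: list[tuple[int, int]] = []
--     open_run = None
--     for s, e in runs:
--         if open_run is None:
--             open_run = (s, e)
--         elif open_run[1] - open_run[0] == e - s: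
--             spans.append((open_run[0], e))
--             open_run = None
--     return spans
-- ===== Notes on version B (the rewrite author's own statement) =====
-- stated objective: alternative
-- what changed: B replaces A's interleaved index-jumping while-loop with two separate passes: a single enumerate sweep that materializes all maximal backtick runs as (start,end) pairs, then a fold over that run list pairing runs of equal length.
import Mathlib
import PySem

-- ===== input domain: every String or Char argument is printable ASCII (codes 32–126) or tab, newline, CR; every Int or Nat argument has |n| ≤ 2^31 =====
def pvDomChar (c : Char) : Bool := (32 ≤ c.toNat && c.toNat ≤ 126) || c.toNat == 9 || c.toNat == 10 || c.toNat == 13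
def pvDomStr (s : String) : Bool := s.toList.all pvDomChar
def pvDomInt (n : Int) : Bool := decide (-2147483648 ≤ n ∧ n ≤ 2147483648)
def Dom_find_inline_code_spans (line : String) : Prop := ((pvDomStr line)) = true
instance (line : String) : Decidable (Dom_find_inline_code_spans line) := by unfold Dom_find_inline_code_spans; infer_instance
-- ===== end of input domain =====

-- B replaces A's interleaved index-jumping scan with two passes: collect all maximal
-- backtick runs, then pair runs of equal length; same O(n) cost, different structure.


-- ===== PORT A =====
-- inner 'while end < len(line) and line[end] == "`"' loop; the fuel argument is only
-- a totality guard (cs.length - e steps suffice), the computation is A's loop verbatim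
def pvA_runEndF : Nat → List Char → Nat → Nat
  | 0, _, e => e
  | fuel + 1, cs, e =>
      if e < cs.length ∧ cs.getD e ' ' = '`' then pvA_runEndF fuel cs (e + 1) else e

def pvA_runEnd (cs : List Char) (e : Nat) : Nat := pvA_runEndF (cs.length - e) cs e

-- outer while loop of A; index is always a nonnegative Python int, kept as Nat;
-- fuel is only a totality guard (index strictly increases, cs.length steps suffice)
def pvA_loopF : Nat → List Char → Nat → Option (List Char × Nat) → List (Int × Int) →
    List (Int × Int)
  | 0, _, _, _, spans => spans
  | fuel + 1, cs, index, stack, spans =>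
      if index < cs.length then
        if cs.getD index ' ' ≠ '`' then pvA_loopF fuel cs (index + 1) stack spans
        else
          let e := pvA_runEnd cs index
          -- line[index:end] with 0 ≤ index ≤ end ≤ len(line): exact as take/drop
          let fence := (cs.drop index).take (e - index)
          match stack with
          | none => pvA_loopF fuel cs e (some (fence, index)) spans
          | some (f, s) =>
              if f = fence then pvA_loopF fuel cs e none (spans ++ [((s : Int), (e : Int))])
              else pvA_loopF fuel cs e (some (f, s)) spans
      else spans

def find_inline_code_spans (line : String) : List (Int × Int) :=
  pvA_loopF line.toList.length line.toList 0 none []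

-- ===== PORT B =====
-- pass 1 body: build the list of maximal backtick runs
def pvB_step1 (st : List (Int × Int) × Option Int) (p : Int × Char) :
    List (Int × Int) × Option Int :=
  if p.2 = '`' then
    match st.2 with
    | none => (st.1, some p.1)
    | some s => (st.1, some s)
  else
    match st.2 with
    | none => st
    | some s => (st.1 ++ [(s, p.1)], none)

-- pass 2 body: pair runs of equal length with a one-slot open fence
def pvB_step2 (st : List (Int × Int) × Option (Int × Int)) (r : Int × Int) :
    List (Int × Int) × Option (Int × Int) :=
  match st.2 with
  | none => (st.1, some r)
  | some o => if o.2 - o.1 = r.2 - r.1 then (st.1 ++ [(o.1, r.2)], none) else st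

def find_inline_code_spans_alt (line : String) : List (Int × Int) :=
  let cs := line.toList
  let p1 := (PySem.List.enumerate cs 0).foldl pvB_step1 ([], none)
  let runs := match p1.2 with
    | none => p1.1
    | some s => p1.1 ++ [(s, (cs.length : Int))]
  (runs.foldl pvB_step2 ([], none)).1

-- ===== PRECONDITION & SPEC =====
def Spec_find_inline_code_spans (line : String) (out : List (Int × Int)) : Prop := out = find_inline_code_spans_alt line
instance (line : String) (out : List (Int × Int)) : Decidable (Spec_find_inline_code_spans line out) := by unfold Spec_find_inline_code_spans; infer_instance

-- ===== CLAIM (what is proved, stated in full; the proofs are below) =====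
def Claim_equal_find_inline_code_spans : Prop := ∀ (line : String), Dom_find_inline_code_spans line → Spec_find_inline_code_spans line (find_inline_code_spans line)

-- ===== LEMMAS AND PROOFS =====

-- canonical run list of the suffix of the line starting at offset i;
-- the option carries the start of a backtick run currently being scanned
def pvRuns : List Char → Nat → Option Nat → List (Nat × Nat)
  | [], _, none => []
  | [], i, some s => [(s, i)]
  | c :: rest, i, none =>
      if c = '`' then pvRuns rest (i + 1) (some i) else pvRuns rest (i + 1) none
  | c :: rest, i, some s =>
      if c = '`' then pvRuns rest (i + 1) (some s)
      else (s, i) :: pvRuns rest (i + 1) none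

-- canonical pairing of a run list (Int endpoints), one-slot open fence
def pvPair : List (Int × Int) → Option (Int × Int) → List (Int × Int) → List (Int × Int)
  | [], _, spans => spans
  | r :: rs, none, spans => pvPair rs (some r) spans
  | r :: rs, some o, spans =>
      if o.2 - o.1 = r.2 - r.1 then pvPair rs none (spans ++ [(o.1, r.2)])
      else pvPair rs (some o) spans

theorem pvDrop_cons (cs : List Char) (i : Nat) (h : i < cs.length) :
    cs.drop i = cs.getD i ' ' :: cs.drop (i + 1) := by
  rw [List.getD_eq_getElem _ _ h, List.drop_eq_getElem_cons h]

theorem pvA_runEndF_ge (fuel : Nat) (cs : List Char) (e : Nat) : e ≤ pvA_runEndF fuel cs e := by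
  induction fuel generalizing e with
  | zero => simp [pvA_runEndF]
  | succ n ih =>
    rw [pvA_runEndF]
    split
    · have := ih (e + 1); omega
    · omega

theorem pvA_runEnd_ge (cs : List Char) (e : Nat) : e ≤ pvA_runEnd cs e :=
  pvA_runEndF_ge _ cs e

theorem pvRunEnd_stop (cs : List Char) (e : Nat)
    (h : ¬ (e < cs.length ∧ cs.getD e ' ' = '`')) : pvA_runEnd cs e = e := by
  unfold pvA_runEnd
  cases hf : cs.length - e with
  | zero => rfl
  | succ n => rw [pvA_runEndF, if_neg h]

theorem pvRunEnd_step (cs : List Char) (e : Nat)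
    (h1 : e < cs.length) (h2 : cs.getD e ' ' = '`') :
    pvA_runEnd cs e = pvA_runEnd cs (e + 1) := by
  unfold pvA_runEnd
  rw [show cs.length - e = (cs.length - (e + 1)) + 1 by omega]
  rw [pvA_runEndF, if_pos ⟨h1, h2⟩]

theorem pvRuns_run (cs : List Char) (i s : Nat) :
    pvRuns (cs.drop i) i (some s)
      = (s, pvA_runEnd cs i) :: pvRuns (cs.drop (pvA_runEnd cs i)) (pvA_runEnd cs i) none := by
  by_cases h : i < cs.length
  · by_cases hc : cs.getD i ' ' = '`'
    · rw [pvDrop_cons cs i h]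
      rw [show pvRuns (cs.getD i ' ' :: cs.drop (i+1)) i (some s)
            = pvRuns (cs.drop (i+1)) (i+1) (some s) by
          simp only [pvRuns]; rw [if_pos hc]]
      rw [pvRunEnd_step cs i h hc]
      exact pvRuns_run cs (i + 1) s
    · rw [pvRunEnd_stop cs i (by tauto)]
      rw [pvDrop_cons cs i h]
      simp only [pvRuns]
      rw [if_neg hc, if_neg hc]
  · have hl : cs.drop i = [] := List.drop_eq_nil_of_le (by omega)
    rw [pvRunEnd_stop cs i (by tauto), hl]
    simp only [pvRuns]
termination_by cs.length - i
decreasing_by omega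

theorem pvRuns_cons (cs : List Char) (i : Nat) (h : i < cs.length)
    (hc : cs.getD i ' ' = '`') :
    pvRuns (cs.drop i) i none
      = (i, pvA_runEnd cs i) :: pvRuns (cs.drop (pvA_runEnd cs i)) (pvA_runEnd cs i) none := by
  rw [pvDrop_cons cs i h]
  rw [show pvRuns (cs.getD i ' ' :: cs.drop (i+1)) i none
        = pvRuns (cs.drop (i+1)) (i+1) (some i) by
      simp only [pvRuns]; rw [if_pos hc]]
  rw [pvRunEnd_step cs i h hc]
  exact pvRuns_run cs (i + 1) i

theorem pvFence_replicate (cs : List Char) (i : Nat) :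
    (cs.drop i).take (pvA_runEnd cs i - i)
      = List.replicate (pvA_runEnd cs i - i) '`' := by
  by_cases h : i < cs.length ∧ cs.getD i ' ' = '`'
  · obtain ⟨h1, h2⟩ := h
    have he := pvRunEnd_step cs i h1 h2
    have hge := pvA_runEnd_ge cs (i + 1)
    rw [pvDrop_cons cs i h1, h2, he]
    have hk : pvA_runEnd cs (i + 1) - i = (pvA_runEnd cs (i + 1) - (i + 1)) + 1 := by omega
    rw [hk, List.take_succ_cons, List.replicate_succ]
    rw [pvFence_replicate cs (i + 1)]
  · rw [pvRunEnd_stop cs i h]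
    simp
termination_by cs.length - i
decreasing_by omega

-- the state correspondence: A's held fence string vs the open run's endpoints
def pvRel (stack : Option (List Char × Nat)) (o : Option (Int × Int)) : Prop :=
  (stack = none ∧ o = none) ∨
  ∃ k s, stack = some (List.replicate k '`', s) ∧ o = some ((s : Int), ((s + k : Nat) : Int))

theorem pvReplicate_eq_iff (k m : Nat) :
    List.replicate k '`' = List.replicate m '`' ↔ k = m := by
  constructor
  · intro h
    have := congrArg List.length h
    simpa using this
  · intro h; rw [h]

def pvCast (r : Nat × Nat) : Int × Int := ((r.1 : Int), (r.2 : Int))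

theorem pvA_loop_eq (cs : List Char) (fuel index : Nat) (stack : Option (List Char × Nat))
    (o : Option (Int × Int)) (spans : List (Int × Int))
    (hfuel : cs.length - index ≤ fuel) (hrel : pvRel stack o) :
    pvA_loopF fuel cs index stack spans
      = pvPair ((pvRuns (cs.drop index) index none).map pvCast) o spans := by
  induction fuel generalizing index stack o spans with
  | zero =>
    have hl : cs.drop index = [] := List.drop_eq_nil_of_le (by omega)
    rw [hl]
    simp [pvA_loopF, pvRuns, pvPair]
  | succ fuel ih =>
    by_cases h : index < cs.length
    · by_cases hc : cs.getD index ' ' = '`'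
      · -- backtick at index: one run is consumed
        have hcons := pvRuns_cons cs index h hc
        set e := pvA_runEnd cs index with he
        have hge : index < e := by
          rw [he, pvRunEnd_step cs index h hc]
          have := pvA_runEnd_ge cs (index + 1); omega
        have hfence := pvFence_replicate cs index
        rw [pvA_loopF, if_pos h, if_neg (by simpa using hc)]
        rw [hcons]
        cases hrel with
        | inl hn =>
          obtain ⟨hs, ho⟩ := hn
          subst hs; subst ho
          simp only [List.map_cons, pvPair]
          rw [← he, hfence]
          refine ih e _ _ spans (by omega) ?_
          right
          exact ⟨e - index, index, rfl, by simp [pvCast]; omega⟩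
        | inr hs =>
          obtain ⟨k, s, hst, ho⟩ := hs
          subst hst; subst ho
          simp only [List.map_cons, pvPair]
          rw [← he, hfence]
          by_cases hk : k = e - index
          · rw [if_pos (by subst hk; rfl),
                if_pos (by simp [pvCast]; omega)]
            refine ih e none none _ (by omega) ?_
            left; exact ⟨rfl, rfl⟩
          · rw [if_neg (by rw [pvReplicate_eq_iff]; omega),
                if_neg (by simp [pvCast]; omega)]
            refine ih e _ _ spans (by omega) ?_
            right
            exact ⟨k, s, rfl, rfl⟩
      · -- non-backtick: both sides skip the character
        rw [pvA_loopF, if_pos h, if_pos (by simpa using hc)]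
        rw [pvDrop_cons cs index h,
            show pvRuns (cs.getD index ' ' :: cs.drop (index+1)) index none
              = pvRuns (cs.drop (index+1)) (index+1) none by
          simp only [pvRuns]; rw [if_neg hc]]
        exact ih (index + 1) stack o spans (by omega) hrel
    · have hl : cs.drop index = [] := List.drop_eq_nil_of_le (by omega)
      rw [pvA_loopF, if_neg h, hl]
      simp [pvRuns, pvPair]

-- B's first pass (fold over enumerate, then the flush) computes the canonical runs
theorem pvB_pass1 (cs : List Char) (i L : Nat) (hL : L = i + cs.length)
    (acc : List (Int × Int)) (start : Option Nat) :
    (let p := (PySem.List.enumerate cs (i : Int)).foldl pvB_step1 (acc, start.map Int.ofNat);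
     match p.2 with
     | none => p.1
     | some s => p.1 ++ [(s, (L : Int))])
    = acc ++ (pvRuns cs i start).map pvCast := by
  induction cs generalizing i acc start with
  | nil =>
    cases start with
    | none => simp [PySem.List.enumerate_nil, pvRuns]
    | some s =>
      simp only [List.length_nil] at hL
      simp [PySem.List.enumerate_nil, pvRuns, pvCast, hL]
  | cons c rest ih =>
    rw [PySem.List.enumerate_cons]
    simp only [List.foldl_cons]
    have hcast : ((i : Int) + 1) = ((i + 1 : Nat) : Int) := by push_cast; ring
    have hL' : L = (i + 1) + rest.length := by simp at hL; omega
    by_cases hc : c = '`'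
    · cases start with
      | none =>
        have h2 := ih (i + 1) hL' acc (some i)
        simp only [Option.map_some, Option.map_none] at h2 ⊢
        rw [show pvB_step1 (acc, none) ((i : Int), c) = (acc, some (Int.ofNat i)) by
              simp [pvB_step1, hc, Int.ofNat_eq_natCast]]
        simp only [pvRuns, if_pos hc]
        rw [hcast]
        exact h2
      | some s =>
        have h2 := ih (i + 1) hL' acc (some s)
        simp only [Option.map_some] at h2 ⊢
        rw [show pvB_step1 (acc, some (Int.ofNat s)) ((i : Int), c) = (acc, some (Int.ofNat s)) by
              simp [pvB_step1, hc]]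
        simp only [pvRuns, if_pos hc]
        rw [hcast]
        exact h2
    · cases start with
      | none =>
        have h2 := ih (i + 1) hL' acc none
        simp only [Option.map_none] at h2 ⊢
        rw [show pvB_step1 (acc, none) ((i : Int), c) = (acc, none) by
              simp [pvB_step1, hc]]
        simp only [pvRuns, if_neg hc]
        rw [hcast]
        exact h2
      | some s =>
        have h2 := ih (i + 1) hL' (acc ++ [((s : Int), (i : Int))]) none
        simp only [Option.map_some, Option.map_none] at h2 ⊢
        rw [show pvB_step1 (acc, some (Int.ofNat s)) ((i : Int), c)
              = (acc ++ [((s : Int), (i : Int))], none) by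
              simp [pvB_step1, hc, Int.ofNat_eq_natCast]]
        simp only [pvRuns, if_neg hc]
        rw [hcast, h2]
        simp [pvCast]

-- B's second pass fold is the canonical pairing
theorem pvB_pass2 (rs : List (Int × Int)) (o : Option (Int × Int)) (spans : List (Int × Int)) :
    (rs.foldl pvB_step2 (spans, o)).1 = pvPair rs o spans := by
  induction rs generalizing o spans with
  | nil => simp [pvPair]
  | cons r t ih =>
    cases o with
    | none => simpa [pvB_step2, pvPair] using ih (some r) spans
    | some p =>
      by_cases hp : p.2 - p.1 = r.2 - r.1
      · simpa [pvB_step2, pvPair, hp] using ih none (spans ++ [(p.1, r.2)])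
      · simpa [pvB_step2, pvPair, hp] using ih (some p) spans

theorem pvAlt_eq (line : String) :
    find_inline_code_spans_alt line
      = pvPair ((pvRuns line.toList 0 none).map pvCast) none [] := by
  have h1 := pvB_pass1 line.toList 0 line.toList.length (by omega) [] none
  simp only [Option.map_none, Nat.cast_zero] at h1
  simp only [find_inline_code_spans_alt]
  rw [pvB_pass2 _ none []]
  rw [h1, List.nil_append]

-- ===== VERDICT (by name: the statement is the Claim_ definition above) =====
theorem find_inline_code_spans_spec : Claim_equal_find_inline_code_spans := by
  intro line _
  unfold Spec_find_inline_code_spans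
  unfold find_inline_code_spans
  rw [pvAlt_eq]
  rw [pvA_loop_eq line.toList line.toList.length 0 none none [] (by omega) (Or.inl ⟨rfl, rfl⟩)]
  rfl
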